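-- pv_equiv track=rewrite | github.com/prismatecas-ui/lotofacil | experimentos/feature_engineering.py | _calcular_features_distribuicao
-- ===== SOURCE A (Python) =====
-- from typing import List, Dict, Tuple, Optional
--
-- def _calcular_features_distribuicao(numeros: List[int]) -> Dict:
--     """
--     Calcula features de distribuição por colunas da cartela
--     """
--     # Distribuição por colunas da cartela Lotofácil
--     colunas = {
--         'coluna_1': [1, 6, 11, 16, 21],
--         'coluna_2': [2, 7, 12, 17, 22],
--         'coluna_3': [3, 8, 13, 18, 23],
--         'coluna_4': [4, 9, 14, 19, 24],
--         'coluna_5': [5, 10, 15, 20, 25]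
--     }
--
--     features = {}
--     for nome_coluna, nums_coluna in colunas.items():
--         features[nome_coluna] = sum(1 for n in numeros if n in nums_coluna)
--
--     # Distribuição por linhas
--     linhas = {
--         'linha_1': list(range(1, 6)),
--         'linha_2': list(range(6, 11)),
--         'linha_3': list(range(11, 16)),
--         'linha_4': list(range(16, 21)),
--         'linha_5': list(range(21, 26))
--     }
--
--     for nome_linha, nums_linha in linhas.items():
--         features[nome_linha] = sum(1 for n in numeros if n in nums_linha)
--
--     # Distribuição por quadrantes
--     features['quadrante_1'] = sum(1 for n in numeros if n in [1,2,3,6,7,8,11,12,13])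
--     features['quadrante_2'] = sum(1 for n in numeros if n in [3,4,5,8,9,10,13,14,15])
--     features['quadrante_3'] = sum(1 for n in numeros if n in [11,12,13,16,17,18,21,22,23])
--     features['quadrante_4'] = sum(1 for n in numeros if n in [13,14,15,18,19,20,23,24,25])
--
--     return features
-- ===== SOURCE B (Python) =====
-- from typing import List, Dict
--
--
-- def _calcular_features_distribuicao(numeros: List[int]) -> Dict:
--     """
--     Calcula features de distribuição por colunas da cartela
--     (single pass over numeros instead of one scan per category)
--     """
--     cols = [0] * 5
--     rows = [0] * 5
--     quads = [0] * 4
--     for n in numeros: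
--         if 1 <= n <= 25:
--             c = (n - 1) % 5
--             r = (n - 1) // 5
--             cols[c] += 1
--             rows[r] += 1
--             if c <= 2 and r <= 2:
--                 quads[0] += 1
--             if c >= 2 and r <= 2:
--                 quads[1] += 1
--             if c <= 2 and r >= 2:
--                 quads[2] += 1
--             if c >= 2 and r >= 2:
--                 quads[3] += 1
--     return {
--         'coluna_1': cols[0], 'coluna_2': cols[1], 'coluna_3': cols[2],
--         'coluna_4': cols[3], 'coluna_5': cols[4],
--         'linha_1': rows[0], 'linha_2': rows[1], 'linha_3': rows[2],
--         'linha_4': rows[3], 'linha_5': rows[4],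
--         'quadrante_1': quads[0], 'quadrante_2': quads[1],
--         'quadrante_3': quads[2], 'quadrante_4': quads[3],
--     }
-- ===== Notes on version B (the rewrite author's own statement) =====
-- stated objective: faster
-- what changed: Replaced A's 14 separate membership scans over numeros (each an O(|numeros|*|category|) 'n in list' pass) by a single pass over numeros that computes each number's column/row by arithmetic and increments the 14 counters directly.
import Mathlib
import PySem

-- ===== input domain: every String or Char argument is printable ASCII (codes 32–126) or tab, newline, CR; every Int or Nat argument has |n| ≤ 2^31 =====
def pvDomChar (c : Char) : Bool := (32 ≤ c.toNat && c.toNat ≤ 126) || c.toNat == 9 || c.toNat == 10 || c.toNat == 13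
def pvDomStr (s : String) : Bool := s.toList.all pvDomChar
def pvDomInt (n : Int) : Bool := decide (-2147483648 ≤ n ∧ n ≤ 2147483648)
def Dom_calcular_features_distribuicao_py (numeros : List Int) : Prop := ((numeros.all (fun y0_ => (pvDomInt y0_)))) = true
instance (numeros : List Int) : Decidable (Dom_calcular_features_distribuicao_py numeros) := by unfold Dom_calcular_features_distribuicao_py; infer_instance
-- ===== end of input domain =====

-- B replaces A's 14 membership scans over `numeros` by one pass that classifies each number arithmetically (objective: faster, single pass).

-- ===== PORT A =====
-- sum(1 for n in numeros if n in lst)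
def pyCountIn (numeros : List Int) (lst : List Int) : Int :=
  numeros.foldl (fun acc n => if n ∈ lst then acc + 1 else acc) 0

def calcular_features_distribuicao_py (numeros : List Int) : List (String × Int) :=
  let colunas : List (String × List Int) :=
    [("coluna_1", [1, 6, 11, 16, 21]),
     ("coluna_2", [2, 7, 12, 17, 22]),
     ("coluna_3", [3, 8, 13, 18, 23]),
     ("coluna_4", [4, 9, 14, 19, 24]),
     ("coluna_5", [5, 10, 15, 20, 25])]
  -- features = {}; for nome, nums in colunas.items(): features[nome] = sum(...)
  let features : PySem.Dict String Int :=
    colunas.foldl (fun d p => d.insert p.1 (pyCountIn numeros p.2)) PySem.Dict.empty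
  let linhas : List (String × List Int) :=
    [("linha_1", [1, 2, 3, 4, 5]),
     ("linha_2", [6, 7, 8, 9, 10]),
     ("linha_3", [11, 12, 13, 14, 15]),
     ("linha_4", [16, 17, 18, 19, 20]),
     ("linha_5", [21, 22, 23, 24, 25])]
  let features := linhas.foldl (fun d p => d.insert p.1 (pyCountIn numeros p.2)) features
  let features := features.insert "quadrante_1" (pyCountIn numeros [1,2,3,6,7,8,11,12,13])
  let features := features.insert "quadrante_2" (pyCountIn numeros [3,4,5,8,9,10,13,14,15])
  let features := features.insert "quadrante_3" (pyCountIn numeros [11,12,13,16,17,18,21,22,23])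
  let features := features.insert "quadrante_4" (pyCountIn numeros [13,14,15,18,19,20,23,24,25])
  features.items

-- ===== PORT B =====
-- one loop iteration of Source B: the state is (cols, rows, quads).
-- `.toNat` is exact here: under the guard 1 ≤ n, (n-1) % 5 and (n-1) // 5 are ≥ 0.
def altStep (st : List Int × List Int × List Int) (n : Int) : List Int × List Int × List Int :=
  if 1 ≤ n ∧ n ≤ 25 then
    let c := (PySem.Int.mod (n - 1) 5).toNat
    let r := (PySem.Int.floordiv (n - 1) 5).toNat
    let cols := st.1.set c (st.1[c]! + 1)
    let rows := st.2.1.set r (st.2.1[r]! + 1)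
    let quads := st.2.2
    let quads := if c ≤ 2 ∧ r ≤ 2 then quads.set 0 (quads[0]! + 1) else quads
    let quads := if 2 ≤ c ∧ r ≤ 2 then quads.set 1 (quads[1]! + 1) else quads
    let quads := if c ≤ 2 ∧ 2 ≤ r then quads.set 2 (quads[2]! + 1) else quads
    let quads := if 2 ≤ c ∧ 2 ≤ r then quads.set 3 (quads[3]! + 1) else quads
    (cols, rows, quads)
  else st

def calcular_features_distribuicao_py_alt (numeros : List Int) : List (String × Int) :=
  let st := numeros.foldl altStep ([0, 0, 0, 0, 0], [0, 0, 0, 0, 0], [0, 0, 0, 0])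
  [("coluna_1", st.1[0]!), ("coluna_2", st.1[1]!), ("coluna_3", st.1[2]!),
   ("coluna_4", st.1[3]!), ("coluna_5", st.1[4]!),
   ("linha_1", st.2.1[0]!), ("linha_2", st.2.1[1]!), ("linha_3", st.2.1[2]!),
   ("linha_4", st.2.1[3]!), ("linha_5", st.2.1[4]!),
   ("quadrante_1", st.2.2[0]!), ("quadrante_2", st.2.2[1]!),
   ("quadrante_3", st.2.2[2]!), ("quadrante_4", st.2.2[3]!)]

-- ===== PRECONDITION & SPEC =====
def Spec_calcular_features_distribuicao_py (numeros : List Int) (out : List (String × Int)) : Prop := out = calcular_features_distribuicao_py_alt numeros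
instance (numeros : List Int) (out : List (String × Int)) : Decidable (Spec_calcular_features_distribuicao_py numeros out) := by unfold Spec_calcular_features_distribuicao_py; infer_instance

-- ===== CLAIM (what is proved, stated in full; the proofs are below) =====
def Claim_equal_calcular_features_distribuicao_py : Prop := ∀ (numeros : List Int), Dom_calcular_features_distribuicao_py numeros → Spec_calcular_features_distribuicao_py numeros (calcular_features_distribuicao_py numeros)

-- ===== LEMMAS AND PROOFS =====

-- number of elements of ns that lie in lst (Int-valued, structural)
def cmem (lst : List Int) : List Int → Int
  | [] => 0
  | n :: ns => (if n ∈ lst then 1 else 0) + cmem lst ns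

lemma pyCountIn_aux (lst : List Int) (ns : List Int) : ∀ acc : Int,
    ns.foldl (fun acc n => if n ∈ lst then acc + 1 else acc) acc = acc + cmem lst ns := by
  induction ns with
  | nil => intro acc; simp [cmem]
  | cons n ns ih =>
    intro acc
    simp only [List.foldl_cons, cmem, ih]
    by_cases h : n ∈ lst
    · simp [h]; ring
    · simp [h]

lemma pyCountIn_eq (numeros lst : List Int) : pyCountIn numeros lst = cmem lst numeros := by
  simpa using pyCountIn_aux lst numeros 0

lemma alt_fold (numeros : List Int) :
    ∀ (a1 a2 a3 a4 a5 b1 b2 b3 b4 b5 q1 q2 q3 q4 : Int),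
    numeros.foldl altStep ([a1,a2,a3,a4,a5], [b1,b2,b3,b4,b5], [q1,q2,q3,q4]) =
    ([a1 + cmem [1,6,11,16,21] numeros, a2 + cmem [2,7,12,17,22] numeros,
      a3 + cmem [3,8,13,18,23] numeros, a4 + cmem [4,9,14,19,24] numeros,
      a5 + cmem [5,10,15,20,25] numeros],
     [b1 + cmem [1,2,3,4,5] numeros, b2 + cmem [6,7,8,9,10] numeros,
      b3 + cmem [11,12,13,14,15] numeros, b4 + cmem [16,17,18,19,20] numeros,
      b5 + cmem [21,22,23,24,25] numeros],
     [q1 + cmem [1,2,3,6,7,8,11,12,13] numeros,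
      q2 + cmem [3,4,5,8,9,10,13,14,15] numeros,
      q3 + cmem [11,12,13,16,17,18,21,22,23] numeros,
      q4 + cmem [13,14,15,18,19,20,23,24,25] numeros]) := by
  induction numeros with
  | nil => intro a1 a2 a3 a4 a5 b1 b2 b3 b4 b5 q1 q2 q3 q4; simp [cmem]
  | cons n ns ih =>
    intro a1 a2 a3 a4 a5 b1 b2 b3 b4 b5 q1 q2 q3 q4
    by_cases h : 1 ≤ n ∧ n ≤ 25
    · have hcase : n = 1 ∨ n = 2 ∨ n = 3 ∨ n = 4 ∨ n = 5 ∨ n = 6 ∨ n = 7 ∨ n = 8 ∨ n = 9 ∨ n = 10 ∨ n = 11 ∨ n = 12 ∨ n = 13 ∨ n = 14 ∨ n = 15 ∨ n = 16 ∨ n = 17 ∨ n = 18 ∨ n = 19 ∨ n = 20 ∨ n = 21 ∨ n = 22 ∨ n = 23 ∨ n = 24 ∨ n = 25 := by omega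
      obtain (rfl|rfl|rfl|rfl|rfl|rfl|rfl|rfl|rfl|rfl|rfl|rfl|rfl|rfl|rfl|rfl|rfl|rfl|rfl|rfl|rfl|rfl|rfl|rfl|rfl) := hcase
      · rw [List.foldl_cons, show altStep ([a1,a2,a3,a4,a5], [b1,b2,b3,b4,b5], [q1,q2,q3,q4]) 1 =
            ([a1+1, a2, a3, a4, a5], [b1+1, b2, b3, b4, b5], [q1+1, q2, q3, q4]) from rfl, ih]
        simp only [cmem, List.mem_cons, List.not_mem_nil]
        norm_num
        omega
      · rw [List.foldl_cons, show altStep ([a1,a2,a3,a4,a5], [b1,b2,b3,b4,b5], [q1,q2,q3,q4]) 2 =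
            ([a1, a2+1, a3, a4, a5], [b1+1, b2, b3, b4, b5], [q1+1, q2, q3, q4]) from rfl, ih]
        simp only [cmem, List.mem_cons, List.not_mem_nil]
        norm_num
        omega
      · rw [List.foldl_cons, show altStep ([a1,a2,a3,a4,a5], [b1,b2,b3,b4,b5], [q1,q2,q3,q4]) 3 =
            ([a1, a2, a3+1, a4, a5], [b1+1, b2, b3, b4, b5], [q1+1, q2+1, q3, q4]) from rfl, ih]
        simp only [cmem, List.mem_cons, List.not_mem_nil]
        norm_num
        omega
      · rw [List.foldl_cons, show altStep ([a1,a2,a3,a4,a5], [b1,b2,b3,b4,b5], [q1,q2,q3,q4]) 4 =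
            ([a1, a2, a3, a4+1, a5], [b1+1, b2, b3, b4, b5], [q1, q2+1, q3, q4]) from rfl, ih]
        simp only [cmem, List.mem_cons, List.not_mem_nil]
        norm_num
        omega
      · rw [List.foldl_cons, show altStep ([a1,a2,a3,a4,a5], [b1,b2,b3,b4,b5], [q1,q2,q3,q4]) 5 =
            ([a1, a2, a3, a4, a5+1], [b1+1, b2, b3, b4, b5], [q1, q2+1, q3, q4]) from rfl, ih]
        simp only [cmem, List.mem_cons, List.not_mem_nil]
        norm_num
        omega
      · rw [List.foldl_cons, show altStep ([a1,a2,a3,a4,a5], [b1,b2,b3,b4,b5], [q1,q2,q3,q4]) 6 =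
            ([a1+1, a2, a3, a4, a5], [b1, b2+1, b3, b4, b5], [q1+1, q2, q3, q4]) from rfl, ih]
        simp only [cmem, List.mem_cons, List.not_mem_nil]
        norm_num
        omega
      · rw [List.foldl_cons, show altStep ([a1,a2,a3,a4,a5], [b1,b2,b3,b4,b5], [q1,q2,q3,q4]) 7 =
            ([a1, a2+1, a3, a4, a5], [b1, b2+1, b3, b4, b5], [q1+1, q2, q3, q4]) from rfl, ih]
        simp only [cmem, List.mem_cons, List.not_mem_nil]
        norm_num
        omega
      · rw [List.foldl_cons, show altStep ([a1,a2,a3,a4,a5], [b1,b2,b3,b4,b5], [q1,q2,q3,q4]) 8 =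
            ([a1, a2, a3+1, a4, a5], [b1, b2+1, b3, b4, b5], [q1+1, q2+1, q3, q4]) from rfl, ih]
        simp only [cmem, List.mem_cons, List.not_mem_nil]
        norm_num
        omega
      · rw [List.foldl_cons, show altStep ([a1,a2,a3,a4,a5], [b1,b2,b3,b4,b5], [q1,q2,q3,q4]) 9 =
            ([a1, a2, a3, a4+1, a5], [b1, b2+1, b3, b4, b5], [q1, q2+1, q3, q4]) from rfl, ih]
        simp only [cmem, List.mem_cons, List.not_mem_nil]
        norm_num
        omega
      · rw [List.foldl_cons, show altStep ([a1,a2,a3,a4,a5], [b1,b2,b3,b4,b5], [q1,q2,q3,q4]) 10 =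
            ([a1, a2, a3, a4, a5+1], [b1, b2+1, b3, b4, b5], [q1, q2+1, q3, q4]) from rfl, ih]
        simp only [cmem, List.mem_cons, List.not_mem_nil]
        norm_num
        omega
      · rw [List.foldl_cons, show altStep ([a1,a2,a3,a4,a5], [b1,b2,b3,b4,b5], [q1,q2,q3,q4]) 11 =
            ([a1+1, a2, a3, a4, a5], [b1, b2, b3+1, b4, b5], [q1+1, q2, q3+1, q4]) from rfl, ih]
        simp only [cmem, List.mem_cons, List.not_mem_nil]
        norm_num
        omega
      · rw [List.foldl_cons, show altStep ([a1,a2,a3,a4,a5], [b1,b2,b3,b4,b5], [q1,q2,q3,q4]) 12 =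
            ([a1, a2+1, a3, a4, a5], [b1, b2, b3+1, b4, b5], [q1+1, q2, q3+1, q4]) from rfl, ih]
        simp only [cmem, List.mem_cons, List.not_mem_nil]
        norm_num
        omega
      · rw [List.foldl_cons, show altStep ([a1,a2,a3,a4,a5], [b1,b2,b3,b4,b5], [q1,q2,q3,q4]) 13 =
            ([a1, a2, a3+1, a4, a5], [b1, b2, b3+1, b4, b5], [q1+1, q2+1, q3+1, q4+1]) from rfl, ih]
        simp only [cmem, List.mem_cons, List.not_mem_nil]
        norm_num
        omega
      · rw [List.foldl_cons, show altStep ([a1,a2,a3,a4,a5], [b1,b2,b3,b4,b5], [q1,q2,q3,q4]) 14 =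
            ([a1, a2, a3, a4+1, a5], [b1, b2, b3+1, b4, b5], [q1, q2+1, q3, q4+1]) from rfl, ih]
        simp only [cmem, List.mem_cons, List.not_mem_nil]
        norm_num
        omega
      · rw [List.foldl_cons, show altStep ([a1,a2,a3,a4,a5], [b1,b2,b3,b4,b5], [q1,q2,q3,q4]) 15 =
            ([a1, a2, a3, a4, a5+1], [b1, b2, b3+1, b4, b5], [q1, q2+1, q3, q4+1]) from rfl, ih]
        simp only [cmem, List.mem_cons, List.not_mem_nil]
        norm_num
        omega
      · rw [List.foldl_cons, show altStep ([a1,a2,a3,a4,a5], [b1,b2,b3,b4,b5], [q1,q2,q3,q4]) 16 =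
            ([a1+1, a2, a3, a4, a5], [b1, b2, b3, b4+1, b5], [q1, q2, q3+1, q4]) from rfl, ih]
        simp only [cmem, List.mem_cons, List.not_mem_nil]
        norm_num
        omega
      · rw [List.foldl_cons, show altStep ([a1,a2,a3,a4,a5], [b1,b2,b3,b4,b5], [q1,q2,q3,q4]) 17 =
            ([a1, a2+1, a3, a4, a5], [b1, b2, b3, b4+1, b5], [q1, q2, q3+1, q4]) from rfl, ih]
        simp only [cmem, List.mem_cons, List.not_mem_nil]
        norm_num
        omega
      · rw [List.foldl_cons, show altStep ([a1,a2,a3,a4,a5], [b1,b2,b3,b4,b5], [q1,q2,q3,q4]) 18 =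
            ([a1, a2, a3+1, a4, a5], [b1, b2, b3, b4+1, b5], [q1, q2, q3+1, q4+1]) from rfl, ih]
        simp only [cmem, List.mem_cons, List.not_mem_nil]
        norm_num
        omega
      · rw [List.foldl_cons, show altStep ([a1,a2,a3,a4,a5], [b1,b2,b3,b4,b5], [q1,q2,q3,q4]) 19 =
            ([a1, a2, a3, a4+1, a5], [b1, b2, b3, b4+1, b5], [q1, q2, q3, q4+1]) from rfl, ih]
        simp only [cmem, List.mem_cons, List.not_mem_nil]
        norm_num
        omega
      · rw [List.foldl_cons, show altStep ([a1,a2,a3,a4,a5], [b1,b2,b3,b4,b5], [q1,q2,q3,q4]) 20 =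
            ([a1, a2, a3, a4, a5+1], [b1, b2, b3, b4+1, b5], [q1, q2, q3, q4+1]) from rfl, ih]
        simp only [cmem, List.mem_cons, List.not_mem_nil]
        norm_num
        omega
      · rw [List.foldl_cons, show altStep ([a1,a2,a3,a4,a5], [b1,b2,b3,b4,b5], [q1,q2,q3,q4]) 21 =
            ([a1+1, a2, a3, a4, a5], [b1, b2, b3, b4, b5+1], [q1, q2, q3+1, q4]) from rfl, ih]
        simp only [cmem, List.mem_cons, List.not_mem_nil]
        norm_num
        omega
      · rw [List.foldl_cons, show altStep ([a1,a2,a3,a4,a5], [b1,b2,b3,b4,b5], [q1,q2,q3,q4]) 22 =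
            ([a1, a2+1, a3, a4, a5], [b1, b2, b3, b4, b5+1], [q1, q2, q3+1, q4]) from rfl, ih]
        simp only [cmem, List.mem_cons, List.not_mem_nil]
        norm_num
        omega
      · rw [List.foldl_cons, show altStep ([a1,a2,a3,a4,a5], [b1,b2,b3,b4,b5], [q1,q2,q3,q4]) 23 =
            ([a1, a2, a3+1, a4, a5], [b1, b2, b3, b4, b5+1], [q1, q2, q3+1, q4+1]) from rfl, ih]
        simp only [cmem, List.mem_cons, List.not_mem_nil]
        norm_num
        omega
      · rw [List.foldl_cons, show altStep ([a1,a2,a3,a4,a5], [b1,b2,b3,b4,b5], [q1,q2,q3,q4]) 24 =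
            ([a1, a2, a3, a4+1, a5], [b1, b2, b3, b4, b5+1], [q1, q2, q3, q4+1]) from rfl, ih]
        simp only [cmem, List.mem_cons, List.not_mem_nil]
        norm_num
        omega
      · rw [List.foldl_cons, show altStep ([a1,a2,a3,a4,a5], [b1,b2,b3,b4,b5], [q1,q2,q3,q4]) 25 =
            ([a1, a2, a3, a4, a5+1], [b1, b2, b3, b4, b5+1], [q1, q2, q3, q4+1]) from rfl, ih]
        simp only [cmem, List.mem_cons, List.not_mem_nil]
        norm_num
        omega
    · have hno : ∀ (lst : List Int), (∀ x ∈ lst, 1 ≤ x ∧ x ≤ 25) → n ∉ lst := by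
        intro lst hl hmem; exact h (hl n hmem)
      simp only [List.foldl_cons, altStep, if_neg h, ih, cmem,
        hno [1,6,11,16,21] (by decide), hno [2,7,12,17,22] (by decide),
        hno [3,8,13,18,23] (by decide), hno [4,9,14,19,24] (by decide),
        hno [5,10,15,20,25] (by decide), hno [1,2,3,4,5] (by decide),
        hno [6,7,8,9,10] (by decide), hno [11,12,13,14,15] (by decide),
        hno [16,17,18,19,20] (by decide), hno [21,22,23,24,25] (by decide),
        hno [1,2,3,6,7,8,11,12,13] (by decide), hno [3,4,5,8,9,10,13,14,15] (by decide),
        hno [11,12,13,16,17,18,21,22,23] (by decide),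
        hno [13,14,15,18,19,20,23,24,25] (by decide), if_false, zero_add]

lemma A_eval (numeros : List Int) :
    calcular_features_distribuicao_py numeros =
    [("coluna_1", cmem [1,6,11,16,21] numeros), ("coluna_2", cmem [2,7,12,17,22] numeros),
     ("coluna_3", cmem [3,8,13,18,23] numeros), ("coluna_4", cmem [4,9,14,19,24] numeros),
     ("coluna_5", cmem [5,10,15,20,25] numeros),
     ("linha_1", cmem [1,2,3,4,5] numeros), ("linha_2", cmem [6,7,8,9,10] numeros),
     ("linha_3", cmem [11,12,13,14,15] numeros), ("linha_4", cmem [16,17,18,19,20] numeros),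
     ("linha_5", cmem [21,22,23,24,25] numeros),
     ("quadrante_1", cmem [1,2,3,6,7,8,11,12,13] numeros),
     ("quadrante_2", cmem [3,4,5,8,9,10,13,14,15] numeros),
     ("quadrante_3", cmem [11,12,13,16,17,18,21,22,23] numeros),
     ("quadrante_4", cmem [13,14,15,18,19,20,23,24,25] numeros)] := by
  simp [calcular_features_distribuicao_py, pyCountIn_eq, PySem.Dict.insert,
    PySem.Dict.empty, PySem.Dict.contains]

lemma B_eval (numeros : List Int) :
    calcular_features_distribuicao_py_alt numeros =
    [("coluna_1", cmem [1,6,11,16,21] numeros), ("coluna_2", cmem [2,7,12,17,22] numeros),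
     ("coluna_3", cmem [3,8,13,18,23] numeros), ("coluna_4", cmem [4,9,14,19,24] numeros),
     ("coluna_5", cmem [5,10,15,20,25] numeros),
     ("linha_1", cmem [1,2,3,4,5] numeros), ("linha_2", cmem [6,7,8,9,10] numeros),
     ("linha_3", cmem [11,12,13,14,15] numeros), ("linha_4", cmem [16,17,18,19,20] numeros),
     ("linha_5", cmem [21,22,23,24,25] numeros),
     ("quadrante_1", cmem [1,2,3,6,7,8,11,12,13] numeros),
     ("quadrante_2", cmem [3,4,5,8,9,10,13,14,15] numeros),
     ("quadrante_3", cmem [11,12,13,16,17,18,21,22,23] numeros),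
     ("quadrante_4", cmem [13,14,15,18,19,20,23,24,25] numeros)] := by
  simp [calcular_features_distribuicao_py_alt, alt_fold]

-- ===== VERDICT (by name: the statement is the Claim_ definition above) =====
theorem calcular_features_distribuicao_py_spec : Claim_equal_calcular_features_distribuicao_py := by
  intro numeros _
  unfold Spec_calcular_features_distribuicao_py
  rw [A_eval, B_eval]
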